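-- pv_equiv track=rewrite | github.com/rudi193-cmd/die-namic-system | apps/mobile/folder_ui.py | route_to_faculty
-- ===== SOURCE A (Python) =====
-- FACULTY_ROUTING = {
--     "Riggs": ["code", "build", "engineer", "fix", "debug", "mechanism", "test", "measure"],
--     "Alexis": ["health", "biology", "body", "medical", "growth", "decay", "energy", "food"],
--     "Hanz": ["python", "javascript", "programming", "help", "stuck", "learn", "teach"],
--     "Oakenscroll": ["theory", "philosophy", "uncertainty", "question", "meaning", "absurd"],
--     "Nova": ["story", "narrative", "meaning", "metaphor", "interpret", "children"],
--     "Ada": ["system", "infrastructure", "uptime", "monitor", "server", "network"],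
--     "Ofshield": ["security", "gate", "access", "protect", "threshold", "safe"],
-- }
--
-- def route_to_faculty(prompt: str) -> str:
--     """Route a prompt to the appropriate UTETY faculty member."""
--     prompt_lower = prompt.lower()
--
--     # Check each faculty's keywords
--     scores = {}
--     for faculty, keywords in FACULTY_ROUTING.items():
--         score = sum(1 for kw in keywords if kw in prompt_lower)
--         if score > 0:
--             scores[faculty] = score
--
--     if scores:
--         # Return highest scoring faculty
--         return max(scores, key=scores.get)
--
--     # Default to Willow if no match
--     return "Willow"
-- ===== SOURCE B (Python) =====
-- FACULTY_ROUTING = {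
--     "Riggs": ["code", "build", "engineer", "fix", "debug", "mechanism", "test", "measure"],
--     "Alexis": ["health", "biology", "body", "medical", "growth", "decay", "energy", "food"],
--     "Hanz": ["python", "javascript", "programming", "help", "stuck", "learn", "teach"],
--     "Oakenscroll": ["theory", "philosophy", "uncertainty", "question", "meaning", "absurd"],
--     "Nova": ["story", "narrative", "meaning", "metaphor", "interpret", "children"],
--     "Ada": ["system", "infrastructure", "uptime", "monitor", "server", "network"],
--     "Ofshield": ["security", "gate", "access", "protect", "threshold", "safe"],
-- }
--
-- def route_to_faculty(prompt: str) -> str: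
--     """Route a prompt to the appropriate UTETY faculty member."""
--     prompt_lower = prompt.lower()
--     # inverted index: every (keyword, faculty) pair of the routing table
--     pairs = [(kw, fac) for fac, kws in FACULTY_ROUTING.items() for kw in kws]
--     # scan the prompt position by position, recording which table entries match there
--     hits = set()
--     for i in range(len(prompt_lower)):
--         for kw, fac in pairs:
--             if prompt_lower.startswith(kw, i):
--                 hits.add((kw, fac))
--     # faculty owning the most hit keywords; first in table order wins ties
--     best, best_score = "Willow", 0
--     for fac, kws in FACULTY_ROUTING.items():
--         score = sum(1 for kw in kws if (kw, fac) in hits)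
--         if score > best_score:
--             best, best_score = fac, score
--     return best
-- ===== Notes on version B (the rewrite author's own statement) =====
-- stated objective: alternative
-- what changed: B inverts the data flow: it builds a keyword->faculty inverted index, scans the prompt position by position collecting the set of table entries that start at each position (prefix matching), and then scores faculties from that hit set, instead of A's faculty-major substring tests into a scores dict followed by max(scores, key=scores.get).
import Mathlib
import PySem

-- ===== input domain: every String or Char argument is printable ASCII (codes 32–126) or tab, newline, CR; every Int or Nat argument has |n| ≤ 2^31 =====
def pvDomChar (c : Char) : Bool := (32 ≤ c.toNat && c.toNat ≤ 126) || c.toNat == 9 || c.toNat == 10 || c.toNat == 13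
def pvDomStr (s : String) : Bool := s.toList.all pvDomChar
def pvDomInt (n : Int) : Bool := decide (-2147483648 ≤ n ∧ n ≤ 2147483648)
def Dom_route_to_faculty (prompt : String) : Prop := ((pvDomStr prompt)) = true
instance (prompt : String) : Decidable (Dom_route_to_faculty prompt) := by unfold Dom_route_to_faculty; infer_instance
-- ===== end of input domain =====

-- B inverts the data flow: an inverted keyword->faculty index, a position-by-position prefix
-- scan of the prompt collecting a set of matched table entries, then scoring from that hit set —
-- instead of A's faculty-major 'kw in prompt' counts into a dict plus max(scores, key=scores.get).

def FACULTY_ROUTING : List (String × List String) :=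
  [("Riggs", ["code", "build", "engineer", "fix", "debug", "mechanism", "test", "measure"]),
   ("Alexis", ["health", "biology", "body", "medical", "growth", "decay", "energy", "food"]),
   ("Hanz", ["python", "javascript", "programming", "help", "stuck", "learn", "teach"]),
   ("Oakenscroll", ["theory", "philosophy", "uncertainty", "question", "meaning", "absurd"]),
   ("Nova", ["story", "narrative", "meaning", "metaphor", "interpret", "children"]),
   ("Ada", ["system", "infrastructure", "uptime", "monitor", "server", "network"]),
   ("Ofshield", ["security", "gate", "access", "protect", "threshold", "safe"])]

-- ===== PORT A =====
-- sum(1 for kw in keywords if kw in prompt_lower)  (A's generator expression)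
def kwScore (promptLower : List Char) (keywords : List String) : Nat :=
  keywords.foldl (fun acc kw => if PySem.Chars.isIn kw.toList promptLower then acc + 1 else acc) 0

def route_to_faculty (prompt : String) : String :=
  let promptLower := PySem.Chars.lower prompt.toList
  let scores : PySem.Dict String Nat :=
    FACULTY_ROUTING.foldl
      (fun d fk =>
        let score := kwScore promptLower fk.2
        if 0 < score then d.insert fk.1 score else d)
      ⟨[]⟩
  if 0 < scores.size then
    -- max(scores, key=scores.get): first key of maximal value; keys all present, so get = getD _ 0
    match PySem.List.max? scores.keys (fun f => scores.getD f 0) with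
    | some f => f
    | none => "Willow"  -- unreachable: scores is nonempty here
  else "Willow"

-- ===== PORT B =====
-- [(kw, fac) for fac, kws in FACULTY_ROUTING.items() for kw in kws]
def invertedIndex : List (String × String) :=
  FACULTY_ROUTING.foldl (fun acc fk => acc ++ fk.2.map (fun kw => (kw, fk.1))) []

def route_to_faculty_alt (prompt : String) : String :=
  let p := PySem.Chars.lower prompt.toList
  -- for i in range(len(p)): for kw, fac in pairs: if p.startswith(kw, i): hits.add((kw, fac))
  -- p.startswith(kw, i) with 0 ≤ i < len(p) is exactly kw.toList.isPrefixOf (p.drop i)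
  let hits : PySem.Set (String × String) :=
    (List.range p.length).foldl
      (fun h i =>
        invertedIndex.foldl
          (fun h kf => if kf.1.toList.isPrefixOf (p.drop i) then PySem.Set.add h kf else h) h)
      PySem.Set.empty
  (FACULTY_ROUTING.foldl
      (fun (best : String × Nat) fk =>
        let score := fk.2.foldl
          (fun acc kw => if PySem.Set.contains hits (kw, fk.1) then acc + 1 else acc) (0 : Nat)
        if best.2 < score then (fk.1, score) else best)
      (("Willow", 0) : String × Nat)).1

-- ===== PRECONDITION & SPEC =====
def Spec_route_to_faculty (prompt : String) (out : String) : Prop := out = route_to_faculty_alt prompt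
instance (prompt : String) (out : String) : Decidable (Spec_route_to_faculty prompt out) := by unfold Spec_route_to_faculty; infer_instance

-- ===== CLAIM =====
def Claim_equal_route_to_faculty : Prop := ∀ (prompt : String), Dom_route_to_faculty prompt → Spec_route_to_faculty prompt (route_to_faculty prompt)

-- ===== LEMMAS AND PROOFS =====

-- A's dict-building step and the strict running-argmax step over (faculty, score) pairs.
def dstep (d : PySem.Dict String Nat) (x : String × Nat) : PySem.Dict String Nat :=
  if 0 < x.2 then d.insert x.1 x.2 else d

def bstep (b x : String × Nat) : String × Nat :=
  if b.2 < x.2 then x else b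

-- A's dict holds exactly the positive-score pairs, in order (keys distinct ⇒ insert appends).
theorem dict_items_eq (t : List (String × Nat)) :
    ∀ (d : PySem.Dict String Nat),
      ((d.items ++ t).map Prod.fst).Nodup →
      (t.foldl dstep d).items = d.items ++ t.filter (fun x => decide (0 < x.2)) := by
  induction t with
  | nil => intro d _; simp
  | cons x t ih =>
    intro d hnd
    simp only [List.foldl_cons, List.filter_cons]
    by_cases hx : 0 < x.2
    · have hcont : d.contains x.1 = false := by
        by_contra h
        have hc : d.contains x.1 = true := by simpa using h
        rw [PySem.Dict.contains_iff_mem_keys] at hc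
        have hx1 : x.1 ∈ d.items.map Prod.fst := by simpa [PySem.Dict.keys] using hc
        have hnd' := hnd
        simp only [List.map_append, List.nodup_append] at hnd'
        exact hnd'.2.2 x.1 hx1 x.1 (by simp) rfl
      have hins : dstep d x = ⟨d.items ++ [x]⟩ := by
        simp [dstep, hx, PySem.Dict.insert, hcont]
      rw [hins, ih ⟨d.items ++ [x]⟩ (by
        simp only [List.append_assoc, List.singleton_append]
        exact hnd)]
      simp [hx]
    · have hskip : dstep d x = d := by simp [dstep, hx]
      rw [hskip, ih d (hnd.sublist (((List.sublist_cons_self x t).append_left d.items).map Prod.fst))]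
      simp [hx]

-- getD on an assoc list with distinct keys returns the stored value.
theorem getD_of_mem (l : List (String × Nat)) (x : String × Nat)
    (hnd : (l.map Prod.fst).Nodup) (hx : x ∈ l) :
    (PySem.Dict.mk l).getD x.1 0 = x.2 := by
  induction l with
  | nil => cases hx
  | cons y l ih =>
    rcases List.mem_cons.mp hx with h | h
    · subst h
      simp [PySem.Dict.getD, PySem.Dict.get?, List.find?]
    · have hne : y.1 ≠ x.1 := by
        intro he
        have : x.1 ∈ l.map Prod.fst := List.mem_map.mpr ⟨x, h, rfl⟩
        simp only [List.map_cons, List.nodup_cons] at hnd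
        exact hnd.1 (he ▸ this)
      have hbeq : (y.1 == x.1) = false := beq_eq_false_iff_ne.mpr hne
      have := ih (by simp only [List.map_cons, List.nodup_cons] at hnd; exact hnd.2) h
      simpa [PySem.Dict.getD, PySem.Dict.get?, List.find?, hbeq] using this

-- one scan step of Python's max: the running best absorbs the next key (strict '<' to replace).
theorem max?_cons_cons (g : String → Nat) (a c : String) (l : List String) :
    PySem.List.max? (a :: c :: l) g = PySem.List.max? ((if g a < g c then c else a) :: l) g := by
  by_cases h : g a < g c <;> simp [PySem.List.max?, h]

-- the max?-scan over keys, with a key function agreeing with .2, is the argmax fold over pairs.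
theorem maxscan (g : String → Nat) (tl : List (String × Nat)) :
    ∀ (b : String × Nat), g b.1 = b.2 → (∀ x ∈ tl, g x.1 = x.2) →
      PySem.List.max? (b.1 :: tl.map (fun x => x.1)) g = some (tl.foldl bstep b).1 := by
  induction tl with
  | nil => intro b _ _; simp [PySem.List.max?]
  | cons x tl ih =>
    intro b hb hall
    have hx := hall x (List.mem_cons_self ..)
    rw [List.map_cons, max?_cons_cons, List.foldl_cons]
    by_cases hlt : b.2 < x.2
    · have hg : g b.1 < g x.1 := by rw [hb, hx]; exact hlt
      rw [if_pos hg, show bstep b x = x from by simp [bstep, hlt]]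
      exact ih x hx (fun y hy => hall y (List.mem_cons_of_mem _ hy))
    · have hg : ¬ g b.1 < g x.1 := by rw [hb, hx]; exact hlt
      rw [if_neg hg, show bstep b x = b from by simp [bstep, hlt]]
      exact ih b hb (fun y hy => hall y (List.mem_cons_of_mem _ hy))

-- zero-score entries never win the strict argmax fold.
theorem bfold_filter (t : List (String × Nat)) :
    ∀ b, t.foldl bstep b = (t.filter (fun x => decide (0 < x.2))).foldl bstep b := by
  induction t with
  | nil => intro b; rfl
  | cons x t ih =>
    intro b
    by_cases hx : 0 < x.2
    · simp [hx, ih]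
    · have h0 : x.2 = 0 := by omega
      have hb : bstep b x = b := by simp [bstep, h0]
      simp only [List.filter_cons, h0, List.foldl_cons, hb]
      simpa using ih b

-- A equals the strict argmax fold, over any (faculty, score) table with distinct faculty names.
theorem generic_eq (t : List (String × Nat)) (hnd : (t.map Prod.fst).Nodup) :
    (if 0 < (t.foldl dstep ⟨[]⟩).size then
       match PySem.List.max? (t.foldl dstep ⟨[]⟩).keys (fun f => (t.foldl dstep ⟨[]⟩).getD f 0) with
       | some f => f
       | none => "Willow"
     else "Willow")
    = (t.foldl bstep ("Willow", 0)).1 := by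
  have hitems : (t.foldl dstep ⟨[]⟩).items = t.filter (fun x => decide (0 < x.2)) := by
    simpa using dict_items_eq t ⟨[]⟩ (by simpa using hnd)
  rw [show (t.foldl bstep ("Willow", 0)) = ((t.filter (fun x => decide (0 < x.2))).foldl bstep ("Willow", 0)) from bfold_filter t _]
  have hndf : ((t.filter (fun x => decide (0 < x.2))).map Prod.fst).Nodup :=
    hnd.sublist ((List.filter_sublist : List.Sublist _ t).map Prod.fst)
  cases hcons : t.filter (fun x => decide (0 < x.2)) with
  | nil =>
    rw [hcons] at hitems
    simp [PySem.Dict.size, hitems]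
  | cons hd tl =>
    rw [hcons] at hitems hndf
    have hdict : t.foldl dstep ⟨[]⟩ = ⟨hd :: tl⟩ := by
      cases hD : t.foldl dstep (⟨[]⟩ : PySem.Dict String Nat) with
      | mk l => rw [hD] at hitems; simp only at hitems; rw [hitems]
    have hmemf : ∀ x ∈ hd :: tl, 0 < x.2 := by
      intro x hxm
      have hxf : x ∈ t.filter (fun x => decide (0 < x.2)) := hcons ▸ hxm
      simpa using List.of_mem_filter hxf
    have hget : ∀ x ∈ hd :: tl, (PySem.Dict.mk (hd :: tl)).getD x.1 0 = x.2 :=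
      fun x hxm => getD_of_mem _ x hndf hxm
    have hstart : bstep ("Willow", 0) hd = hd := by
      simp [bstep, hmemf hd (List.mem_cons_self ..)]
    have hm : PySem.List.max? (hd.1 :: List.map (fun x => x.1) tl)
        (fun f => (PySem.Dict.mk (hd :: tl)).getD f 0) = some (List.foldl bstep hd tl).1 :=
      maxscan (fun s => (PySem.Dict.mk (hd :: tl)).getD s 0) tl hd
        (hget hd (List.mem_cons_self ..))
        (fun x hx => hget x (List.mem_cons_of_mem _ hx))
    simp only [hdict, PySem.Dict.size, PySem.Dict.keys, List.length_cons, List.map_cons,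
      List.foldl_cons, hstart]
    rw [if_pos (Nat.succ_pos _), hm]

-- membership after the inner per-position fold of B: the entries matching at position i get added.
theorem mem_inner (p : List Char) (i : Nat) (ps : List (String × String)) :
    ∀ (h : PySem.Set (String × String)) (x : String × String),
      x ∈ ps.foldl (fun h kf => if kf.1.toList.isPrefixOf (p.drop i) then PySem.Set.add h kf else h) h
      ↔ x ∈ h ∨ (x ∈ ps ∧ x.1.toList.isPrefixOf (p.drop i) = true) := by
  induction ps with
  | nil => intro h x; simp
  | cons y t ih =>
    intro h x
    simp only [List.foldl_cons]
    by_cases hy : y.1.toList.isPrefixOf (p.drop i) = true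
    · rw [if_pos hy, ih]
      simp only [PySem.Set.mem_add, List.mem_cons]
      constructor
      · rintro ((hh | rfl) | ⟨hm, hp⟩)
        · exact Or.inl hh
        · exact Or.inr ⟨Or.inl rfl, hy⟩
        · exact Or.inr ⟨Or.inr hm, hp⟩
      · rintro (hh | ⟨(rfl | hm), hp⟩)
        · exact Or.inl (Or.inl hh)
        · exact Or.inl (Or.inr rfl)
        · exact Or.inr ⟨hm, hp⟩
    · rw [if_neg hy, ih]
      simp only [List.mem_cons]
      constructor
      · rintro (hh | ⟨hm, hp⟩)
        · exact Or.inl hh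
        · exact Or.inr ⟨Or.inr hm, hp⟩
      · rintro (hh | ⟨(rfl | hm), hp⟩)
        · exact Or.inl hh
        · exact absurd hp hy
        · exact Or.inr ⟨hm, hp⟩

-- membership after the outer position fold of B.
theorem mem_outer (p : List Char) (ps : List (String × String)) :
    ∀ (I : List Nat) (h : PySem.Set (String × String)) (x : String × String),
      x ∈ I.foldl (fun h i => ps.foldl (fun h kf => if kf.1.toList.isPrefixOf (p.drop i) then PySem.Set.add h kf else h) h) h
      ↔ x ∈ h ∨ (x ∈ ps ∧ ∃ i ∈ I, x.1.toList.isPrefixOf (p.drop i) = true) := by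
  intro I
  induction I with
  | nil => intro h x; simp
  | cons i I ih =>
    intro h x
    simp only [List.foldl_cons]
    rw [ih, mem_inner]
    simp only [List.mem_cons]
    constructor
    · rintro ((hh | ⟨hm, hp⟩) | ⟨hm, j, hj, hp⟩)
      · exact Or.inl hh
      · exact Or.inr ⟨hm, i, Or.inl rfl, hp⟩
      · exact Or.inr ⟨hm, j, Or.inr hj, hp⟩
    · rintro (hh | ⟨hm, j, (rfl | hj), hp⟩)
      · exact Or.inl (Or.inl hh)
      · exact Or.inl (Or.inr ⟨hm, hp⟩)
      · exact Or.inr ⟨hm, j, hj, hp⟩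

-- for a nonempty keyword of the table, membership in B's hit set is A's 'kw in prompt_lower'.
theorem contains_hits_eq (p : List Char) (kw fac : String)
    (hmem : (kw, fac) ∈ invertedIndex) (hne : kw.toList ≠ []) :
    PySem.Set.contains
      ((List.range p.length).foldl
        (fun h i =>
          invertedIndex.foldl
            (fun h kf => if kf.1.toList.isPrefixOf (p.drop i) then PySem.Set.add h kf else h) h)
        PySem.Set.empty) (kw, fac)
    = PySem.Chars.isIn kw.toList p := by
  have hchar := mem_outer p invertedIndex (List.range p.length) PySem.Set.empty (kw, fac)
  rcases hb : PySem.Chars.isIn kw.toList p with _ | _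
  · -- isIn = false: no position matches
    rw [PySem.Chars.isIn_eq_false_iff] at hb
    apply Bool.eq_false_iff.mpr
    intro hc
    have hx := hchar.mp ((PySem.Set.contains_iff _ _).mp hc)
    rcases hx with hh | ⟨_, i, _, hp⟩
    · simp [PySem.Set.empty] at hh
    · exact hb (List.infix_iff_prefix_suffix.mpr
        ⟨p.drop i, List.isPrefixOf_iff_prefix.mp hp, List.drop_suffix i p⟩)
  · -- isIn = true: some drop position carries the keyword as prefix, and it is < length
    have hex : ∃ j, kw.toList <+: p.drop j :=
      (PySem.Chars.exists_prefix_drop_iff_isIn kw.toList p).mpr hb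
    rcases hex with ⟨j, hj⟩
    have hjlt : j < p.length := by
      by_contra hge
      have : p.drop j = [] := List.drop_eq_nil_of_le (by omega)
      rw [this] at hj
      exact hne (List.prefix_nil.mp hj)
    apply (PySem.Set.contains_iff _ _).mpr
    exact hchar.mpr (Or.inr ⟨hmem, j, List.mem_range.mpr hjlt, List.isPrefixOf_iff_prefix.mpr hj⟩)

-- ===== VERDICT =====
theorem route_to_faculty_spec : Claim_equal_route_to_faculty := by
  intro prompt _
  unfold Spec_route_to_faculty route_to_faculty route_to_faculty_alt
  set p := PySem.Chars.lower prompt.toList with hp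
  -- B's inner score fold equals A's kwScore, faculty by faculty
  have hscore : ∀ fk ∈ FACULTY_ROUTING, ∀ (best : String × Nat),
      (fun best fk =>
        let score := fk.2.foldl
          (fun acc kw => if PySem.Set.contains
            ((List.range p.length).foldl
              (fun h i => invertedIndex.foldl
                (fun h kf => if kf.1.toList.isPrefixOf (p.drop i) then PySem.Set.add h kf else h) h)
              PySem.Set.empty) (kw, fk.1) then acc + 1 else acc) (0 : Nat)
        if best.2 < score then (fk.1, score) else best) best fk
      = bstep best (fk.1, kwScore p fk.2) := by
    intro fk hfk best
    have hs : fk.2.foldl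
        (fun acc kw => if PySem.Set.contains
          ((List.range p.length).foldl
            (fun h i => invertedIndex.foldl
              (fun h kf => if kf.1.toList.isPrefixOf (p.drop i) then PySem.Set.add h kf else h) h)
            PySem.Set.empty) (kw, fk.1) then acc + 1 else acc) (0 : Nat)
        = kwScore p fk.2 := by
      unfold kwScore
      apply PySem.List.foldl_congr_mem
      intro acc kw hkw
      have hmem : (kw, fk.1) ∈ invertedIndex ∧ kw.toList ≠ [] := by
        fin_cases hfk <;> fin_cases hkw <;> exact ⟨by decide, by decide⟩
      rw [contains_hits_eq p kw fk.1 hmem.1 hmem.2]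
    simp only [hs]
    rfl
  have hB : (FACULTY_ROUTING.foldl
      (fun best fk =>
        let score := fk.2.foldl
          (fun acc kw => if PySem.Set.contains
            ((List.range p.length).foldl
              (fun h i => invertedIndex.foldl
                (fun h kf => if kf.1.toList.isPrefixOf (p.drop i) then PySem.Set.add h kf else h) h)
              PySem.Set.empty) (kw, fk.1) then acc + 1 else acc) (0 : Nat)
        if best.2 < score then (fk.1, score) else best)
      ("Willow", 0))
      = (FACULTY_ROUTING.map (fun fk => (fk.1, kwScore p fk.2))).foldl bstep ("Willow", 0) := by
    rw [List.foldl_map]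
    exact PySem.List.foldl_congr_mem _ _ _ _ (fun best fk hfk => hscore fk hfk best)
  have h := generic_eq (FACULTY_ROUTING.map (fun fk => (fk.1, kwScore p fk.2)))
    (by simp only [List.map_map, Function.comp_def]; decide)
  rw [List.foldl_map] at h
  simp only [hB]
  rw [List.foldl_map]
  simpa [dstep, bstep] using h
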